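-- pv_equiv track=rewrite | github.com/ketnas/Bomberman-MDT310 | game_data/file/g9_submission.py | is_blocked_or_unsafe
-- ===== SOURCE A (Python) =====
-- GRID_UNSAFE = 1 # Bomb blast range (temporary)
--
-- GRID_BOX = 2
--
-- GRID_WALL = 3 # Includes permanent walls AND bomb bodies for pathing checks
--
-- def is_blocked_or_unsafe(x, y, grid, ghosts_positions):
--     """
--     Checks if a tile is blocked (wall, box, bomb) OR unsafe (blast, ghost proximity).
--     Used for cornered check. Returns True if blocked/unsafe.
--     """
--     grid_width = len(grid)
--     grid_height = len(grid[0])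
--
--     # Check Bounds
--     if not (0 <= x < grid_width and 0 <= y < grid_height):
--         return True # Out of bounds is blocked
--
--     # Check Grid Blockers/Dangers
--     # Unsafe blast, Box, Wall/Bomb Body
--     if grid[x][y] in [GRID_UNSAFE, GRID_BOX, GRID_WALL]:
--         return True
--
--     # Check Ghost Proximity
--     for gx, gy in ghosts_positions:
--         if abs(x - gx) + abs(y - gy) <= 1:
--             return True # Too close to ghost
--
--     return False # Otherwise, it's clear or just has a player/distant ghost
-- ===== SOURCE B (Python) =====
-- GRID_UNSAFE = 1
-- GRID_BOX = 2
-- GRID_WALL = 3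
--
-- def is_blocked_or_unsafe(x, y, grid, ghosts_positions):
--     grid_width = len(grid)
--     grid_height = len(grid[0])
--     if not (0 <= x < grid_width and 0 <= y < grid_height):
--         return True
--     if grid[x][y] in [GRID_UNSAFE, GRID_BOX, GRID_WALL]:
--         return True
--     # Index the ghosts once, then probe the five cells at Manhattan distance <= 1.
--     ghosts = set(ghosts_positions)
--     return any(cell in ghosts
--                for cell in ((x, y), (x + 1, y), (x - 1, y), (x, y + 1), (x, y - 1)))
-- ===== Notes on version B (the rewrite author's own statement) =====
-- stated objective: alternative
-- what changed: The per-ghost Manhattan-distance scan is replaced by building a set of ghost positions once and probing the five cells at distance <= 1 against it, inverting the traversal from all ghosts to a constant number of probed cells.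
import Mathlib
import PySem

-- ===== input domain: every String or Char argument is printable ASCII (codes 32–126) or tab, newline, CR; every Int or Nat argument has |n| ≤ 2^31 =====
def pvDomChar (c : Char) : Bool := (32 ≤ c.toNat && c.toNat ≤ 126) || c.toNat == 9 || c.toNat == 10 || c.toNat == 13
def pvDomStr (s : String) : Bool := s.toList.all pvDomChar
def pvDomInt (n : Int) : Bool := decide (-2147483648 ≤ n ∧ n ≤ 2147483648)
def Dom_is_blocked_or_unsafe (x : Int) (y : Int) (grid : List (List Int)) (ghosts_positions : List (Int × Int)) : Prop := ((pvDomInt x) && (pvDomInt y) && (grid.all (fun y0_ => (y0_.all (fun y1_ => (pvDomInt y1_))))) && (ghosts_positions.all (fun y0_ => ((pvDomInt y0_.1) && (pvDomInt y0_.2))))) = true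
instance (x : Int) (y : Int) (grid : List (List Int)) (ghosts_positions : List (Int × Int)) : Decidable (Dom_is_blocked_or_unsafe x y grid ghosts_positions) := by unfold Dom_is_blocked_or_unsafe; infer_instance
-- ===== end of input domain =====

-- B replaces A's per-ghost distance scan by a ghost-position set probed at the five
-- cells at Manhattan distance ≤ 1 (alternative decomposition; same cost).

-- ===== PORT A =====
-- the 'for gx, gy in ghosts_positions' loop of A
def ghostScanA (x : Int) (y : Int) : List (Int × Int) → Bool
  | [] => false
  | (gx, gy) :: rest =>
      if (x - gx).natAbs + (y - gy).natAbs ≤ 1 then true else ghostScanA x y rest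

def is_blocked_or_unsafe (x : Int) (y : Int) (grid : List (List Int)) (ghosts_positions : List (Int × Int)) : Bool :=
  let grid_width : Int := grid.length
  let grid_height : Int := (grid.headD []).length  -- len(grid[0]); Pre_ excludes grid = []
  if ¬ (0 ≤ x ∧ x < grid_width ∧ 0 ≤ y ∧ y < grid_height) then true
  else
    -- grid[x][y]; in-bounds here, Pre_ excludes a too-short row x
    let v : Int := PySem.List.pyGetD (PySem.List.pyGetD grid x []) y 0
    if v = 1 ∨ v = 2 ∨ v = 3 then true
    else ghostScanA x y ghosts_positions

-- ===== PORT B =====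
def is_blocked_or_unsafe_alt (x : Int) (y : Int) (grid : List (List Int)) (ghosts_positions : List (Int × Int)) : Bool :=
  let grid_width : Int := grid.length
  let grid_height : Int := (grid.headD []).length
  if ¬ (0 ≤ x ∧ x < grid_width ∧ 0 ≤ y ∧ y < grid_height) then true
  else
    let v : Int := PySem.List.pyGetD (PySem.List.pyGetD grid x []) y 0
    if v = 1 ∨ v = 2 ∨ v = 3 then true
    else
      let ghosts : PySem.Set (Int × Int) := PySem.Set.ofList ghosts_positions
      [(x, y), (x + 1, y), (x - 1, y), (x, y + 1), (x, y - 1)].any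
        (fun cell => PySem.Set.contains ghosts cell)

-- ===== PRECONDITION & SPEC =====
-- Pre_ excludes exactly the inputs where A raises IndexError: an empty grid
-- (len(grid[0])), or an in-bounds (x, y) whose row grid[x] is shorter than y + 1.
def Pre_is_blocked_or_unsafe (x : Int) (y : Int) (grid : List (List Int)) (ghosts_positions : List (Int × Int)) : Prop :=
  grid ≠ [] ∧
  ((0 ≤ x ∧ x < (grid.length : Int) ∧ 0 ≤ y ∧ y < ((grid.headD []).length : Int)) →
    y < ((PySem.List.pyGetD grid x []).length : Int))

instance (x : Int) (y : Int) (grid : List (List Int)) (ghosts_positions : List (Int × Int)) : Decidable (Pre_is_blocked_or_unsafe x y grid ghosts_positions) := by unfold Pre_is_blocked_or_unsafe; infer_instance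

def pvWitness_is_blocked_or_unsafe : Int × Int × List (List Int) × (List (Int × Int)) :=
  (1, 1, [[0, 0], [0, 0]], [(2, 1)])

def Spec_is_blocked_or_unsafe (x : Int) (y : Int) (grid : List (List Int)) (ghosts_positions : List (Int × Int)) (out : Bool) : Prop := out = is_blocked_or_unsafe_alt x y grid ghosts_positions
instance (x : Int) (y : Int) (grid : List (List Int)) (ghosts_positions : List (Int × Int)) (out : Bool) : Decidable (Spec_is_blocked_or_unsafe x y grid ghosts_positions out) := by unfold Spec_is_blocked_or_unsafe; infer_instance

-- ===== CLAIM (what is proved, stated in full; the proofs are below) =====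
def Claim_equal_is_blocked_or_unsafe : Prop := ∀ (x : Int) (y : Int) (grid : List (List Int)) (ghosts_positions : List (Int × Int)), Dom_is_blocked_or_unsafe x y grid ghosts_positions → Pre_is_blocked_or_unsafe x y grid ghosts_positions → Spec_is_blocked_or_unsafe x y grid ghosts_positions (is_blocked_or_unsafe x y grid ghosts_positions)

-- ===== LEMMAS AND PROOFS =====

theorem ghostScanA_eq_true_iff (x y : Int) (gs : List (Int × Int)) :
    ghostScanA x y gs = true ↔ ∃ g ∈ gs, (x - g.1).natAbs + (y - g.2).natAbs ≤ 1 := by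
  induction gs with
  | nil => simp [ghostScanA]
  | cons g rest ih =>
      obtain ⟨gx, gy⟩ := g
      simp only [ghostScanA]
      split_ifs with h
      · simp; exact Or.inl h
      · simp [ih, h]

theorem mem_cells_iff (x y gx gy : Int) :
    ((gx, gy) ∈ ([(x, y), (x + 1, y), (x - 1, y), (x, y + 1), (x, y - 1)] : List (Int × Int))) ↔
      (x - gx).natAbs + (y - gy).natAbs ≤ 1 := by
  simp only [List.mem_cons, List.not_mem_nil, or_false, Prod.mk.injEq]
  omega

theorem ghost_parts_eq (x y : Int) (gs : List (Int × Int)) :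
    ghostScanA x y gs =
      ([(x, y), (x + 1, y), (x - 1, y), (x, y + 1), (x, y - 1)] : List (Int × Int)).any
        (fun cell => PySem.Set.contains (PySem.Set.ofList gs) cell) := by
  apply Bool.eq_iff_iff.mpr
  rw [ghostScanA_eq_true_iff, List.any_eq_true]
  constructor
  · rintro ⟨⟨gx, gy⟩, hmem, hd⟩
    exact ⟨(gx, gy), (mem_cells_iff x y gx gy).mpr hd, by
      simp [PySem.Set.contains, PySem.Set.mem_ofList, hmem]⟩
  · rintro ⟨⟨gx, gy⟩, hc, hmem⟩
    refine ⟨(gx, gy), ?_, (mem_cells_iff x y gx gy).mp hc⟩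
    simpa [PySem.Set.contains, PySem.Set.mem_ofList] using hmem

-- ===== VERDICT (by name: the statement is the Claim_ definition above) =====
theorem is_blocked_or_unsafe_spec : Claim_equal_is_blocked_or_unsafe := by
  intro x y grid gs _ _
  unfold Spec_is_blocked_or_unsafe is_blocked_or_unsafe is_blocked_or_unsafe_alt
  simp only [ghost_parts_eq]
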